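-- pv_equiv track=rewrite | github.com/PauloVictorSS/unicamp-mc102 | tarefa10/maximo.py | maior_numero_lista
-- ===== SOURCE A (Python) =====
-- def maior_numero_lista(lista_numeros, posicao_n):
--     """
--         Determina o maior elemento de uma lista
--         recebendo a posição_n de um elemento da lista
--         e comparando com o resto
--     """
--
--     if posicao_n == 0:
--         return lista_numeros[0]
--
--     maior_elemento = maior_numero_lista(lista_numeros, posicao_n - 1)
--
--     if lista_numeros[posicao_n] > maior_elemento:
--         return lista_numeros[posicao_n]
--     else:
--         return maior_elemento
-- ===== SOURCE B (Python) =====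
-- def maior_numero_lista(lista_numeros, posicao_n):
--     maior = lista_numeros[0]
--     for i in range(1, posicao_n + 1):
--         if lista_numeros[i] > maior:
--             maior = lista_numeros[i]
--     return maior
-- ===== Notes on version B (the rewrite author's own statement) =====
-- stated objective: idiomatic
-- what changed: Replaced the head recursion peeling posicao_n down to 0 with a single forward iterative loop keeping a running maximum accumulator (strict > preserves first-occurrence ties).
import Mathlib
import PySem

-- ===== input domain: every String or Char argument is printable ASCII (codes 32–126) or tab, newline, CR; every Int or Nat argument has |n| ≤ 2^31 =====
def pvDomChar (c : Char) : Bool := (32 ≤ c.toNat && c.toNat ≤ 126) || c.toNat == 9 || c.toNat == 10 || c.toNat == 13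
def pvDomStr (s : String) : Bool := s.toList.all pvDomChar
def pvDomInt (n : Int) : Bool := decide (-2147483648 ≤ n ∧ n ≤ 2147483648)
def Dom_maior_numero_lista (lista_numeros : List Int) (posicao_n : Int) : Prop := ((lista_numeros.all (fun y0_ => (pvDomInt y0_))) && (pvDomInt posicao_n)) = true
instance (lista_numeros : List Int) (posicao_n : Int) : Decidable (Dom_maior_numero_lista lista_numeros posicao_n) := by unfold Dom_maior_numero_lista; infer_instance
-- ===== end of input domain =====

-- B replaces A's head recursion by an iterative forward loop with a running-max accumulator (idiomatic; same O(n) cost, no recursion depth).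


-- ===== PORT A =====
-- A recurses on posicao_n - 1 down to 0; we transcribe it as structural recursion on
-- posicao_n.toNat (on Pre_ posicao_n ≥ 0, so toNat is exact; for posicao_n < 0 the
-- Python recursion never returns — those inputs are outside Pre_).
def maiorAuxA (lista_numeros : List Int) : Nat → Int
  | 0 => PySem.List.pyGetD lista_numeros 0 0
  | n + 1 =>
    let maior_elemento := maiorAuxA lista_numeros n
    let x := PySem.List.pyGetD lista_numeros ((n : Int) + 1) 0
    if x > maior_elemento then x else maior_elemento

def maior_numero_lista (lista_numeros : List Int) (posicao_n : Int) : Int :=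
  maiorAuxA lista_numeros posicao_n.toNat

-- ===== PORT B =====
-- maior = lista[0]; for i in range(1, posicao_n+1): if lista[i] > maior: maior = lista[i]
def maior_numero_lista_alt (lista_numeros : List Int) (posicao_n : Int) : Int :=
  (PySem.List.pyRange 1 (posicao_n + 1) 1).foldl
    (fun maior i =>
      let x := PySem.List.pyGetD lista_numeros i 0
      if x > maior then x else maior)
    (PySem.List.pyGetD lista_numeros 0 0)

-- ===== PRECONDITION & SPEC =====
-- Exactly the inputs on which Python A returns: 0 ≤ posicao_n (else infinite recursion)
-- and posicao_n < len (else IndexError); this also forces the list nonempty.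
def Pre_maior_numero_lista (lista_numeros : List Int) (posicao_n : Int) : Prop :=
  0 ≤ posicao_n ∧ posicao_n < lista_numeros.length

instance (lista_numeros : List Int) (posicao_n : Int) : Decidable (Pre_maior_numero_lista lista_numeros posicao_n) := by unfold Pre_maior_numero_lista; infer_instance

def pvWitness_maior_numero_lista : List Int × Int := ([3, 7, 2], 2)

def Spec_maior_numero_lista (lista_numeros : List Int) (posicao_n : Int) (out : Int) : Prop := out = maior_numero_lista_alt lista_numeros posicao_n
instance (lista_numeros : List Int) (posicao_n : Int) (out : Int) : Decidable (Spec_maior_numero_lista lista_numeros posicao_n out) := by unfold Spec_maior_numero_lista; infer_instance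

-- ===== CLAIM (what is proved, stated in full; the proofs are below) =====
def Claim_equal_maior_numero_lista : Prop := ∀ (lista_numeros : List Int) (posicao_n : Int), Dom_maior_numero_lista lista_numeros posicao_n → Pre_maior_numero_lista lista_numeros posicao_n → Spec_maior_numero_lista lista_numeros posicao_n (maior_numero_lista lista_numeros posicao_n)


-- ===== LEMMAS AND PROOFS =====
-- A's recursion up to n equals B's fold over range(1, n+1).
theorem maiorAuxA_eq_foldl (lista_numeros : List Int) (n : Nat) :
    maiorAuxA lista_numeros n =
      (PySem.List.pyRange 1 ((n : Int) + 1) 1).foldl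
        (fun maior i =>
          let x := PySem.List.pyGetD lista_numeros i 0
          if x > maior then x else maior)
        (PySem.List.pyGetD lista_numeros 0 0) := by
  induction n with
  | zero => simp [maiorAuxA, PySem.List.pyRange_one_eq_nil (by omega : (1:Int) ≤ 1)]
  | succ n ih =>
    rw [show ((n + 1 : Nat) : Int) + 1 = ((n : Int) + 1) + 1 by push_cast; ring,
        PySem.List.pyRange_one_succ_right (by omega : (1:Int) ≤ (n : Int) + 1),
        List.foldl_append]
    simp [maiorAuxA, ih]

-- ===== VERDICT (by name: the statement is the Claim_ definition above) =====
theorem maior_numero_lista_spec : Claim_equal_maior_numero_lista := by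
  intro l p _ hpre
  unfold Pre_maior_numero_lista at hpre
  unfold Spec_maior_numero_lista maior_numero_lista maior_numero_lista_alt
  rw [maiorAuxA_eq_foldl]
  congr 2
  omega
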